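-- pv_equiv track=rewrite | github.com/AriannaBi/Algorithms-Data-Structures | exercise/197.py | Find_Square_i
-- ===== SOURCE A (Python) =====
-- def Binary_Search_2D(A, x, y):
--     A.sort()
--     first = 0
--     last = len(A) - 1
--     while first <= last:
--         middle = (first + last) // 2
--         if A[middle][0] < x:
--             first = middle + 1
--         elif A[middle][0] > x:
--             last = middle - 1
--         elif first == last and A[first][0] == x and A[first][1] == y:
--             return True
--         elif first == last:
--             return False
--         elif A[middle][1] < y:
--             first = middle + 1
--         elif A[middle][1] > y:
--             last = middle - 1
--         else:
--             return True
--     return False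
--
-- def Find_Square_i(A):
--     A.sort()
--     for i in range(0, len(A)):
--         for j in range(i + 1, len(A)):
--             dx = A[j][0] - A[i][0]
--             dy = A[j][1] - A[i][1]
--             if Binary_Search_2D(A, A[i][0] + dy, A[i][1] - dx) and Binary_Search_2D(A, A[j][0] + dy, A[j][1] - dx):
--                 return True
--     return False
-- ===== SOURCE B (Python) =====
-- def Find_Square_i(A):
--     # Same in-place sort of the argument that A performs (observable side effect kept).
--     A.sort()
--     pts = set(A)                      # hash set: O(1) corner-existence checks
--     rest = A
--     while rest:
--         (px, py), rest = rest[0], rest[1:]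
--         for (qx, qy) in rest:
--             dx = qx - px
--             dy = qy - py
--             if (px + dy, py - dx) in pts and (qx + dy, qy - dx) in pts:
--                 return True
--     return False
-- ===== Notes on version B (the rewrite author's own statement) =====
-- stated objective: faster
-- what changed: B replaces A's per-pair hand-written binary searches (each preceded by a re-sort of the whole list) with a hash set of the points built once, so each candidate square corner is an O(1) membership test over all pairs.
import Mathlib
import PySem

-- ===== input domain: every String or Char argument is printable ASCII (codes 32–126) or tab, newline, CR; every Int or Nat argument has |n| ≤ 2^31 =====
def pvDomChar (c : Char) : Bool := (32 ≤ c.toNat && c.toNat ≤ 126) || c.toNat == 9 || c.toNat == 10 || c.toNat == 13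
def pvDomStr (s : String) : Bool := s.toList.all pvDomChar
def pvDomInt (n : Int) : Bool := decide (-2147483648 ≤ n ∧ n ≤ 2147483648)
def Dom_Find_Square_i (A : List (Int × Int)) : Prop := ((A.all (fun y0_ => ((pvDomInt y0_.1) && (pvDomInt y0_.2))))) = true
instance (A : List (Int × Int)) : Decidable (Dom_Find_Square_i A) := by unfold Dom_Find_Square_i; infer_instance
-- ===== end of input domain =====

-- ===== PORT A =====
-- B replaces A's per-pair binary searches (each re-sorting the list) with a point set built once.
-- Both A and B sort the argument list in place (same side effect); the theorems are about the return value.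

-- the while-loop of Binary_Search_2D; terminates because the [first,last] window shrinks
def Binary_Search_2D_loop (S : List (Int × Int)) (x y first last : Int) : Bool :=
  if h : first ≤ last then
    let middle := PySem.Int.floordiv (first + last) 2
    -- A[middle] / A[first]: in range whenever Python reads them; the none-arms are totality guards
    match PySem.List.pyGet? S middle, PySem.List.pyGet? S first with
    | some p, some q =>
      if p.1 < x then Binary_Search_2D_loop S x y (middle + 1) last
      else if x < p.1 then Binary_Search_2D_loop S x y first (middle - 1)
      else if first = last ∧ q.1 = x ∧ q.2 = y then true
      else if first = last then false
      else if p.2 < y then Binary_Search_2D_loop S x y (middle + 1) last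
      else if y < p.2 then Binary_Search_2D_loop S x y first (middle - 1)
      else true
    | _, _ => false
  else false
termination_by (last - first + 1).toNat
decreasing_by
  all_goals
    have hb := PySem.Int.floordiv_two_mid_bounds h
    omega

def Binary_Search_2D (A : List (Int × Int)) (x y : Int) : Bool :=
  let S := PySem.List.sorted2 A Prod.fst Prod.snd     -- A.sort(): int pairs sort lexicographically
  Binary_Search_2D_loop S x y 0 ((S.length : Int) - 1)

def Find_Square_i (A : List (Int × Int)) : Bool :=
  let S := PySem.List.sorted2 A Prod.fst Prod.snd     -- A.sort()
  (PySem.List.pyRange 0 (S.length : Int)).any fun i =>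
    (PySem.List.pyRange (i + 1) (S.length : Int)).any fun j =>
      match PySem.List.pyGet? S i, PySem.List.pyGet? S j with
      | some pi, some pj =>
        let dx := pj.1 - pi.1
        let dy := pj.2 - pi.2
        Binary_Search_2D S (pi.1 + dy) (pi.2 - dx) && Binary_Search_2D S (pj.1 + dy) (pj.2 - dx)
      | _, _ => false

-- ===== PORT B =====
-- the 'while rest:' loop of Source B: peel the head, scan the tail, recurse
def Find_Square_i_altLoop (pts : PySem.Set (Int × Int)) : List (Int × Int) → Bool
  | [] => false
  | p :: rest =>
    (rest.any fun q =>
      let dx := q.1 - p.1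
      let dy := q.2 - p.2
      PySem.Set.contains pts (p.1 + dy, p.2 - dx) &&
      PySem.Set.contains pts (q.1 + dy, q.2 - dx))
    || Find_Square_i_altLoop pts rest

def Find_Square_i_alt (A : List (Int × Int)) : Bool :=
  let S := PySem.List.sorted2 A Prod.fst Prod.snd     -- A.sort()
  Find_Square_i_altLoop (PySem.Set.ofList S) S        -- pts = set(A)

-- ===== PRECONDITION & SPEC =====
def Spec_Find_Square_i (A : List (Int × Int)) (out : Bool) : Prop := out = Find_Square_i_alt A
instance (A : List (Int × Int)) (out : Bool) : Decidable (Spec_Find_Square_i A out) := by unfold Spec_Find_Square_i; infer_instance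

-- ===== CLAIM (what is proved, stated in full; the proofs are below) =====
def Claim_equal_Find_Square_i : Prop := ∀ (A : List (Int × Int)), Dom_Find_Square_i A → Spec_Find_Square_i A (Find_Square_i A)

-- ===== LEMMAS AND PROOFS =====

def pvLexKey (p : Int × Int) : Int ×ₗ Int := toLex p

lemma pvSorted2_eq_sorted (xs : List (Int × Int)) :
    PySem.List.sorted2 xs Prod.fst Prod.snd = PySem.List.sorted xs pvLexKey := by
  have hfun : (fun (a b : Int × Int) => decide (a.1 < b.1) || (!decide (b.1 < a.1) && decide (a.2 < b.2)))
      = fun a b => decide (pvLexKey a < pvLexKey b) := by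
    funext a b
    rcases lt_trichotomy a.1 b.1 with h | h | h <;>
      by_cases h2 : a.2 < b.2 <;>
        simp [pvLexKey, Prod.Lex.toLex_lt_toLex, h, h2, not_lt_of_gt] <;> omega
  simp [PySem.List.sorted2, PySem.List.sorted, hfun]

lemma pvSorted_pairwise (A : List (Int × Int)) :
    List.Pairwise (fun a b => pvLexKey a ≤ pvLexKey b) (PySem.List.sorted2 A Prod.fst Prod.snd) := by
  rw [pvSorted2_eq_sorted]
  exact PySem.List.sorted_pairwise A pvLexKey

lemma pvSorted_idem (A : List (Int × Int)) :
    PySem.List.sorted2 (PySem.List.sorted2 A Prod.fst Prod.snd) Prod.fst Prod.snd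
      = PySem.List.sorted2 A Prod.fst Prod.snd := by
  rw [pvSorted2_eq_sorted, pvSorted2_eq_sorted, PySem.List.sorted_sorted]

lemma pvNotMem (S : List (Int × Int)) (x y first last : Int)
    (hocc : ∀ (k : Nat) (hk : k < S.length), S[k] = (x, y) → first ≤ (k : Int) ∧ (k : Int) ≤ last)
    (hempty : last < first) : ((x, y) ∉ S) := by
  intro hmem
  obtain ⟨k, hk, hkeq⟩ := List.mem_iff_getElem.mp hmem
  have := hocc k hk hkeq
  omega

lemma pvLoop_correct (S : List (Int × Int))
    (hs : List.Pairwise (fun a b => pvLexKey a ≤ pvLexKey b) S) (x y : Int) :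
    ∀ (n : Nat) (first last : Int), (last - first + 1).toNat ≤ n → 0 ≤ first → last < (S.length : Int) →
    (∀ (k : Nat) (hk : k < S.length), S[k] = (x, y) → first ≤ (k : Int) ∧ (k : Int) ≤ last) →
    Binary_Search_2D_loop S x y first last = decide ((x, y) ∈ S) := by
  have hmono : ∀ (a b : Nat) (ha : a < S.length) (hb : b < S.length), a < b →
      pvLexKey S[a] ≤ pvLexKey S[b] := by
    intro a b ha hb hab
    exact List.pairwise_iff_getElem.mp hs a b ha hb hab
  have hlex : ∀ (u v : Int × Int), pvLexKey u ≤ pvLexKey v ↔ (u.1 < v.1 ∨ (u.1 = v.1 ∧ u.2 ≤ v.2)) := by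
    intro u v
    rw [pvLexKey, pvLexKey, Prod.Lex.toLex_le_toLex]
  have hEq : ∀ (a b : Nat) (ha : a < S.length) (hb : b < S.length), a = b → S[a] = S[b] := by
    intro a b ha hb h; subst h; rfl
  -- if S[m] is lex-below (x,y), any occurrence of (x,y) is above m
  have hconfA : ∀ (m k : Nat) (hm : m < S.length) (hk : k < S.length), S[k] = (x, y) →
      (S[m].1 < x ∨ (S[m].1 = x ∧ S[m].2 < y)) → m < k := by
    intro m k hm hk hkeq hlt
    by_contra hcon
    push Not at hcon
    rcases Nat.lt_or_ge k m with hlt2 | hge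
    · have h := (hlex _ _).mp (hmono k m hk hm hlt2)
      rw [hkeq] at h
      simp only [] at h
      rcases h with h | ⟨h, h'⟩ <;> omega
    · have hkm : k = m := by omega
      have := hEq m k hm hk hkm.symm
      rw [hkeq] at this
      rw [this] at hlt
      simp only [] at hlt
      rcases hlt with h | ⟨h, h'⟩ <;> omega
  -- if S[m] is lex-above (x,y), any occurrence of (x,y) is below m
  have hconfB : ∀ (m k : Nat) (hm : m < S.length) (hk : k < S.length), S[k] = (x, y) →
      (x < S[m].1 ∨ (S[m].1 = x ∧ y < S[m].2)) → k < m := by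
    intro m k hm hk hkeq hlt
    by_contra hcon
    push Not at hcon
    rcases Nat.lt_or_ge m k with hlt2 | hge
    · have h := (hlex _ _).mp (hmono m k hm hk hlt2)
      rw [hkeq] at h
      simp only [] at h
      rcases h with h | ⟨h, h'⟩ <;> omega
    · have hkm : k = m := by omega
      have := hEq m k hm hk hkm.symm
      rw [hkeq] at this
      rw [this] at hlt
      simp only [] at hlt
      rcases hlt with h | ⟨h, h'⟩ <;> omega
  intro n
  induction n with
  | zero =>
    intro first last hn hf hl hocc
    rw [Binary_Search_2D_loop, dif_neg (by omega)]
    simp [pvNotMem S x y first last hocc (by omega)]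
  | succ n ih =>
    intro first last hn hf hl hocc
    by_cases hfl : first ≤ last
    · rw [Binary_Search_2D_loop, dif_pos hfl]
      have hb := PySem.Int.floordiv_two_mid_bounds hfl
      set middle := PySem.Int.floordiv (first + last) 2 with hmid
      have hm0 : 0 ≤ middle := by omega
      have hmlen : middle < (S.length : Int) := by omega
      have hflen : first < (S.length : Int) := by omega
      have hmn : middle.toNat < S.length := by omega
      have hfn : first.toNat < S.length := by omega
      have hpg : PySem.List.pyGet? S middle = some S[middle.toNat] :=
        PySem.List.pyGet?_eq_some_getElem S hm0 hmlen
      have hqg : PySem.List.pyGet? S first = some S[first.toNat] :=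
        PySem.List.pyGet?_eq_some_getElem S hf hflen
      simp only [hpg, hqg]
      by_cases h1 : S[middle.toNat].1 < x
      · rw [if_pos h1, ih (middle+1) last (by omega) (by omega) hl ?_]
        intro k hk hkeq
        have := hconfA middle.toNat k hmn hk hkeq (Or.inl h1)
        have := (hocc k hk hkeq).2
        omega
      · rw [if_neg h1]
        by_cases h2 : x < S[middle.toNat].1
        · rw [if_pos h2, ih first (middle-1) (by omega) hf (by omega) ?_]
          intro k hk hkeq
          have := hconfB middle.toNat k hmn hk hkeq (Or.inl h2)
          have := (hocc k hk hkeq).1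
          omega
        · rw [if_neg h2]
          have hpx : S[middle.toNat].1 = x := by omega
          by_cases h3 : first = last ∧ S[first.toNat].1 = x ∧ S[first.toNat].2 = y
          · rw [if_pos h3]
            have hq : S[first.toNat] = (x, y) := Prod.ext h3.2.1 h3.2.2
            have hmem : (x, y) ∈ S := by rw [← hq]; exact List.getElem_mem _
            simp [hmem]
          · rw [if_neg h3]
            by_cases h4 : first = last
            · rw [if_pos h4]
              have hme : middle.toNat = first.toNat := by omega
              have hpq : S[middle.toNat] = S[first.toNat] := hEq _ _ hmn hfn hme
              have hqx : S[first.toNat].1 = x := by rw [← hpq]; exact hpx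
              have hqy : S[first.toNat].2 ≠ y := fun hcon => h3 ⟨h4, hqx, hcon⟩
              have hnm : (x, y) ∉ S := by
                intro hmem
                obtain ⟨k, hk, hkeq⟩ := List.mem_iff_getElem.mp hmem
                have hkl := hocc k hk hkeq
                have hkf : k = first.toNat := by omega
                have := hEq first.toNat k hfn hk hkf.symm
                rw [hkeq] at this
                rw [this] at hqy
                simp at hqy
              simp [hnm]
            · rw [if_neg h4]
              by_cases h5 : S[middle.toNat].2 < y
              · rw [if_pos h5, ih (middle+1) last (by omega) (by omega) hl ?_]
                intro k hk hkeq
                have := hconfA middle.toNat k hmn hk hkeq (Or.inr ⟨hpx, h5⟩)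
                have := (hocc k hk hkeq).2
                omega
              · rw [if_neg h5]
                by_cases h6 : y < S[middle.toNat].2
                · rw [if_pos h6, ih first (middle-1) (by omega) hf (by omega) ?_]
                  intro k hk hkeq
                  have := hconfB middle.toNat k hmn hk hkeq (Or.inr ⟨hpx, h6⟩)
                  have := (hocc k hk hkeq).1
                  omega
                · rw [if_neg h6]
                  have hpy : S[middle.toNat].2 = y := by omega
                  have hmem : (x, y) ∈ S := by
                    have : S[middle.toNat] = (x, y) := Prod.ext hpx hpy
                    rw [← this]; exact List.getElem_mem _
                  simp [hmem]
    · rw [Binary_Search_2D_loop, dif_neg hfl]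
      simp [pvNotMem S x y first last hocc (by omega)]

lemma pvPyRange_nil (a b : Int) (h : b ≤ a) : PySem.List.pyRange a b = [] := by
  have hl := PySem.List.length_pyRange_one a b
  have : (PySem.List.pyRange a b).length = 0 := by omega
  exact List.eq_nil_of_length_eq_zero this

lemma pvPyRange_shift (a b : Int) :
    PySem.List.pyRange (a + 1) (b + 1) = (PySem.List.pyRange a b).map (· + 1) := by
  have key : ∀ n : Nat, ∀ a : Int, b - a ≤ n →
      PySem.List.pyRange (a + 1) (b + 1) = (PySem.List.pyRange a b).map (· + 1) := by
    intro n
    induction n with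
    | zero => intro a ha; rw [pvPyRange_nil a b (by omega), pvPyRange_nil (a+1) (b+1) (by omega)]; rfl
    | succ n ih =>
      intro a ha
      by_cases h2 : a < b
      · rw [PySem.List.pyRange_one_cons h2, PySem.List.pyRange_one_cons (by omega : a + 1 < b + 1),
          List.map_cons, ih (a+1) (by omega)]
      · rw [pvPyRange_nil a b (by omega), pvPyRange_nil (a+1) (b+1) (by omega)]; rfl
  exact key (b - a).toNat a (by omega)

lemma pvIdx_any (L : List (Int × Int)) (f : (Int × Int) → Bool) :
    ((PySem.List.pyRange 0 (L.length : Int)).any fun j =>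
      match PySem.List.pyGet? L j with
      | some q => f q
      | none => false) = L.any f := by
  induction L with
  | nil => simp [pvPyRange_nil 0 0 le_rfl]
  | cons p T ih =>
    have hlen : ((p :: T).length : Int) = (T.length : Int) + 1 := by push_cast [List.length_cons]; ring
    rw [hlen, PySem.List.pyRange_one_cons (by positivity), List.any_cons]
    rw [show (0 : Int) + 1 = 0 + 1 from rfl, pvPyRange_shift 0 (T.length : Int), List.any_map]
    have hbody : ∀ j ∈ PySem.List.pyRange 0 (T.length : Int),
        ((fun j => match PySem.List.pyGet? (p :: T) j with
          | some q => f q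
          | none => false) ∘ (· + 1)) j
        = (fun j => match PySem.List.pyGet? T j with
          | some q => f q
          | none => false) j := by
      intro j hj
      have hj' := PySem.List.mem_pyRange_one.mp hj
      obtain ⟨k, rfl⟩ : ∃ k : Nat, j = (k : Int) := ⟨j.toNat, by omega⟩
      simp only [Function.comp_apply, PySem.List.pyGet?_cons_succ]
    rw [PySem.List.any_congr_mem hbody]
    simp [ih]

def pvPairsAny (g : (Int × Int) → (Int × Int) → Bool) : List (Int × Int) → Bool
  | [] => false
  | p :: rest => (rest.any (g p)) || pvPairsAny g rest

lemma pvPairs_eq (g : (Int × Int) → (Int × Int) → Bool) (L : List (Int × Int)) :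
    ((PySem.List.pyRange 0 (L.length : Int)).any fun i =>
      (PySem.List.pyRange (i + 1) (L.length : Int)).any fun j =>
        match PySem.List.pyGet? L i, PySem.List.pyGet? L j with
        | some p, some q => g p q
        | _, _ => false) = pvPairsAny g L := by
  induction L with
  | nil => simp [pvPyRange_nil 0 0 le_rfl, pvPairsAny]
  | cons p T ih =>
    have hlen : ((p :: T).length : Int) = (T.length : Int) + 1 := by push_cast [List.length_cons]; ring
    rw [hlen, PySem.List.pyRange_one_cons (by positivity), List.any_cons]
    -- head term: i = 0
    have hhead :
        ((PySem.List.pyRange (0 + 1) ((T.length : Int) + 1)).any fun j =>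
          match PySem.List.pyGet? (p :: T) 0, PySem.List.pyGet? (p :: T) j with
          | some a, some b => g a b
          | _, _ => false) = T.any (g p) := by
      rw [pvPyRange_shift 0 (T.length : Int), List.any_map]
      have hb : ∀ j ∈ PySem.List.pyRange 0 (T.length : Int),
          ((fun j => match PySem.List.pyGet? (p :: T) 0, PySem.List.pyGet? (p :: T) j with
            | some a, some b => g a b
            | _, _ => false) ∘ (· + 1)) j
          = (fun j => match PySem.List.pyGet? T j with
            | some b => g p b
            | none => false) j := by
        intro j hj
        have hj' := PySem.List.mem_pyRange_one.mp hj
        obtain ⟨k, rfl⟩ : ∃ k : Nat, j = (k : Int) := ⟨j.toNat, by omega⟩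
        simp only [Function.comp_apply, PySem.List.pyGet?_cons_succ, PySem.List.pyGet?_zero_cons]
        cases PySem.List.pyGet? T ((k : Int)) <;> rfl
      rw [PySem.List.any_congr_mem hb, pvIdx_any]
    -- tail: shift
    have htail :
        ((PySem.List.pyRange (0 + 1) ((T.length : Int) + 1)).any fun i =>
          (PySem.List.pyRange (i + 1) ((T.length : Int) + 1)).any fun j =>
            match PySem.List.pyGet? (p :: T) i, PySem.List.pyGet? (p :: T) j with
            | some a, some b => g a b
            | _, _ => false) = pvPairsAny g T := by
      rw [pvPyRange_shift 0 (T.length : Int), List.any_map]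
      have hb : ∀ i ∈ PySem.List.pyRange 0 (T.length : Int),
          ((fun i => (PySem.List.pyRange (i + 1) ((T.length : Int) + 1)).any fun j =>
              match PySem.List.pyGet? (p :: T) i, PySem.List.pyGet? (p :: T) j with
              | some a, some b => g a b
              | _, _ => false) ∘ (· + 1)) i
          = (fun i => (PySem.List.pyRange (i + 1) (T.length : Int)).any fun j =>
              match PySem.List.pyGet? T i, PySem.List.pyGet? T j with
              | some a, some b => g a b
              | _, _ => false) i := by
        intro i hi
        have hi' := PySem.List.mem_pyRange_one.mp hi
        obtain ⟨k, rfl⟩ : ∃ k : Nat, i = (k : Int) := ⟨i.toNat, by omega⟩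
        simp only [Function.comp_apply]
        rw [show ((k : Int) + 1 + 1) = ((k : Int) + 1) + 1 from rfl,
          pvPyRange_shift ((k : Int) + 1) (T.length : Int), List.any_map,
          PySem.List.pyGet?_cons_succ]
        apply PySem.List.any_congr_mem
        intro j hj
        have hj' := PySem.List.mem_pyRange_one.mp hj
        obtain ⟨m, rfl⟩ : ∃ m : Nat, j = (m : Int) := ⟨j.toNat, by omega⟩
        simp only [Function.comp_apply, PySem.List.pyGet?_cons_succ]
      rw [PySem.List.any_congr_mem hb, ih]
    rw [hhead, htail]
    rfl

lemma pvContains_ofList (S : List (Int × Int)) (c : Int × Int) :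
    PySem.Set.contains (PySem.Set.ofList S) c = decide (c ∈ S) := by
  simp [PySem.Set.contains, PySem.Set.mem_ofList]

lemma pvAltLoop_eq (S : List (Int × Int)) (L : List (Int × Int)) :
    Find_Square_i_altLoop (PySem.Set.ofList S) L
      = pvPairsAny (fun p q =>
          decide ((p.1 + (q.2 - p.2), p.2 - (q.1 - p.1)) ∈ S) &&
          decide ((q.1 + (q.2 - p.2), q.2 - (q.1 - p.1)) ∈ S)) L := by
  induction L with
  | nil => rfl
  | cons p T ih =>
    simp only [Find_Square_i_altLoop, pvPairsAny, ih, pvContains_ofList]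

lemma pvBS_mem (A : List (Int × Int)) (x y : Int) :
    Binary_Search_2D (PySem.List.sorted2 A Prod.fst Prod.snd) x y
      = decide ((x, y) ∈ PySem.List.sorted2 A Prod.fst Prod.snd) := by
  rw [Binary_Search_2D]
  simp only [pvSorted_idem]
  exact pvLoop_correct (PySem.List.sorted2 A Prod.fst Prod.snd) (pvSorted_pairwise A) x y
    (((PySem.List.sorted2 A Prod.fst Prod.snd).length : Int) - 1 - 0 + 1).toNat 0
    (((PySem.List.sorted2 A Prod.fst Prod.snd).length : Int) - 1)
    (by omega) (by omega) (by omega)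
    (fun k hk _ => by constructor <;> omega)

-- ===== VERDICT (by name: the statement is the Claim_ definition above) =====
theorem Find_Square_i_spec : Claim_equal_Find_Square_i := by
  intro A _
  unfold Spec_Find_Square_i Find_Square_i Find_Square_i_alt
  rw [pvAltLoop_eq]
  simp only [pvBS_mem]
  exact pvPairs_eq _ _
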